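-- pv_equiv track=rewrite | github.com/benz0id/mb_prime | multiplex_spacer_generator/generate_spacer_seqs.py | get_allowable_bases
-- ===== SOURCE A (Python) =====
-- from typing import List, Any, Callable
-- import math
--
-- BASE_TO_INT = {
--     '-': 0,
--     'A': 1,
--     'T': 2,
--     'G': 3,
--     'C': 4
-- }
--
-- def get_allowable_bases(aln: List[List[str]], column: int) -> List[int]:
--     """Returns the number of each base that could be inserted while maintaining
--     heterogeneity."""
--     next_4 = math.ceil(len(aln) / 4)
--     allowable = [next_4] * 4
--
--     for row in range(len(aln)):
--         base = aln[row][column]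
--         if base == '-':
--             continue
--         ind = BASE_TO_INT[base] - 1
--         allowable[ind] -= 1
--
--     for num_base in allowable:
--         assert num_base >= 0
--
--     return allowable
-- ===== SOURCE B (Python) =====
-- import math
--
-- BASE_TO_INT = {
--     '-': 0,
--     'A': 1,
--     'T': 2,
--     'G': 3,
--     'C': 4
-- }
--
-- def get_allowable_bases(aln, column):
--     """Returns the number of each base that could be inserted while maintaining
--     heterogeneity."""
--     next_4 = math.ceil(len(aln) / 4)
--     # sort the column's base codes, then sweep once with a cursor:
--     # for each code 1..4 the run of equal codes tells how many slots are used.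
--     codes = sorted(BASE_TO_INT[row[column]] for row in aln)
--     allowable = []
--     i = 0
--     for code in (1, 2, 3, 4):
--         while i < len(codes) and codes[i] < code:
--             i += 1
--         n = next_4
--         while i < len(codes) and codes[i] == code:
--             n -= 1
--             i += 1
--         assert n >= 0
--         allowable.append(n)
--     return allowable
-- ===== Notes on version B (the rewrite author's own statement) =====
-- stated objective: alternative
-- what changed: Replaces A's row-indexed decrement of a mutable 4-slot list by a sort-then-sweep: the column is mapped to integer base codes, sorted, and a single cursor walks the sorted runs, deriving each slot as ceil(n/4) minus the run length.
import Mathlib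
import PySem

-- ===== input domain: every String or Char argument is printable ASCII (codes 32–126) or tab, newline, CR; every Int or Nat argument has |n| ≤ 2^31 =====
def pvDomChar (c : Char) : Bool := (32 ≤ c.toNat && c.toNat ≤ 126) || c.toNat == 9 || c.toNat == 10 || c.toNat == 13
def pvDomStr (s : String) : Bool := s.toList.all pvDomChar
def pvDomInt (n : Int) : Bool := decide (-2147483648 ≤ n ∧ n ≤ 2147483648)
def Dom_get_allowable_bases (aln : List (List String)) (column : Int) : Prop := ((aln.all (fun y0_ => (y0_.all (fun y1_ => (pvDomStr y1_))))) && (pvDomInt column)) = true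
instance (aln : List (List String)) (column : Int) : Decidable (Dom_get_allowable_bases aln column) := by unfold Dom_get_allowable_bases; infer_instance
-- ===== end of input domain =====

-- B replaces A's row-indexed decrement of a mutable 4-slot list by a sort-then-sweep
-- over the column's base codes (alternative decomposition; return values proved equal on Pre_).

-- ===== PORT A =====
-- BASE_TO_INT lookup (dict of literals, ported as first-match lookup; none = KeyError)
def baseToInt? (b : String) : Option Int :=
  if b = "-" then some 0
  else if b = "A" then some 1
  else if b = "T" then some 2
  else if b = "G" then some 3
  else if b = "C" then some 4
  else none

-- the 'for row in range(len(aln))' loop over the mutable 4-slot list; none = a raise inside the loop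
def gabLoopA : List (List String) → Int → List Int → Option (List Int)
  | [], _, acc => some acc
  | r :: rs, c, acc =>
    match PySem.List.pyGet? r c with
    | none => none
    | some base =>
      if base = "-" then gabLoopA rs c acc
      else
        match baseToInt? base with
        | none => none
        | some v => gabLoopA rs c (acc.set (v - 1).toNat (acc.getD (v - 1).toNat 0 - 1))

def get_allowable_bases (aln : List (List String)) (column : Int) : List Int :=
  -- math.ceil(len(aln)/4) on a Nat length is exactly (n+3)/4
  let next_4 : Int := ((aln.length : Int) + 3) / 4
  match gabLoopA aln column (List.replicate 4 next_4) with
  | none => []   -- IndexError / KeyError: excluded by Pre_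
  | some allowable =>
    if allowable.all (fun n => decide (0 ≤ n)) then allowable else []   -- assert failure excluded by Pre_

-- ===== PORT B =====
-- B's BASE_TO_INT lookup (used inside the sorted(...) generator; none = KeyError)
def baseCode? (b : String) : Option Int :=
  if b = "-" then some 0
  else if b = "A" then some 1
  else if b = "T" then some 2
  else if b = "G" then some 3
  else if b = "C" then some 4
  else none

-- 'while i < len(codes) and codes[i] < code: i += 1' — advance the cursor past smaller codes
def gabSkip (code : Int) : List Int → List Int
  | [] => []
  | x :: xs => if x < code then gabSkip code xs else x :: xs

-- 'while i < len(codes) and codes[i] == code: n -= 1; i += 1' — consume the run of equal codes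
def gabTake (code : Int) (n : Int) : List Int → Int × List Int
  | [] => (n, [])
  | x :: xs => if x = code then gabTake code (n - 1) xs else (n, x :: xs)

-- 'for code in (1, 2, 3, 4): …' — the sweep; none = assert failure
def gabScan (n4 : Int) : List Int → List Int → Option (List Int)
  | _, [] => some []
  | codes, c :: cs =>
    let p := gabTake c n4 (gabSkip c codes)
    if 0 ≤ p.1 then (gabScan n4 p.2 cs).map (p.1 :: ·) else none

def get_allowable_bases_alt (aln : List (List String)) (column : Int) : List Int :=
  let next_4 : Int := ((aln.length : Int) + 3) / 4
  match aln.mapM (fun row => (PySem.List.pyGet? row column).bind baseCode?) with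
  | none => []   -- IndexError / KeyError inside sorted(...): excluded by Pre_
  | some codes0 =>
    match gabScan next_4 (PySem.List.sorted codes0 (fun x => x) false) [1, 2, 3, 4] with
    | some allowable => allowable
    | none => []   -- assert failure excluded by Pre_

-- ===== PRECONDITION & SPEC =====
-- Pre_: every row has a valid entry at `column` and it is one of '-','A','T','G','C' (else A raises
-- IndexError/KeyError), and no base occurs more than ceil(n/4) times in the column (else A's assert raises).
def Pre_get_allowable_bases (aln : List (List String)) (column : Int) : Prop :=
  ((aln.all (fun r =>
      match PySem.List.pyGet? r column with
      | some b => ["-", "A", "T", "G", "C"].contains b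
      | none => false))
   && (["A", "T", "G", "C"].all (fun b =>
        decide (((aln.filterMap (fun r => PySem.List.pyGet? r column)).count b : Int)
                 ≤ ((aln.length : Int) + 3) / 4)))) = true
instance (aln : List (List String)) (column : Int) : Decidable (Pre_get_allowable_bases aln column) := by
  unfold Pre_get_allowable_bases; infer_instance

def pvWitness_get_allowable_bases : List (List String) × Int := ([["A"], ["-"]], 0)

def Spec_get_allowable_bases (aln : List (List String)) (column : Int) (out : List Int) : Prop := out = get_allowable_bases_alt aln column
instance (aln : List (List String)) (column : Int) (out : List Int) : Decidable (Spec_get_allowable_bases aln column out) := by unfold Spec_get_allowable_bases; infer_instance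

-- ===== CLAIM (what is proved, stated in full; the proofs are below) =====
def Claim_equal_get_allowable_bases : Prop := ∀ (aln : List (List String)) (column : Int), Dom_get_allowable_bases aln column → Pre_get_allowable_bases aln column → Spec_get_allowable_bases aln column (get_allowable_bases aln column)

-- ===== LEMMAS AND PROOFS =====

-- validity of every row's entry at `column`
def gabValid (aln : List (List String)) (column : Int) : Prop :=
  ∀ r ∈ aln, ∃ b, PySem.List.pyGet? r column = some b ∧ b ∈ (["-", "A", "T", "G", "C"] : List String)

-- the code of a valid base
def gabCode (b : String) : Int := (baseCode? b).getD 0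

lemma gab_mapM_eq (aln : List (List String)) (column : Int)
    (h : gabValid aln column) :
    aln.mapM (fun row => (PySem.List.pyGet? row column).bind baseCode?)
      = some ((aln.filterMap (fun r => PySem.List.pyGet? r column)).map gabCode) := by
  induction aln with
  | nil => rfl
  | cons r rs ih =>
    obtain ⟨b, hb, hmem⟩ := h r (by simp)
    have ih' := ih (fun x hx => h x (by simp [hx]))
    fin_cases hmem <;>
      simp [List.mapM_cons, hb, ih', gabCode,
        show baseCode? "-" = some 0 from rfl, show baseCode? "A" = some 1 from rfl,
        show baseCode? "T" = some 2 from rfl, show baseCode? "G" = some 3 from rfl,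
        show baseCode? "C" = some 4 from rfl]

-- counts of codes correspond to counts of bases
lemma gab_count_code (bases : List String)
    (h : ∀ b ∈ bases, b ∈ (["-", "A", "T", "G", "C"] : List String))
    (s : String) (c : Int)
    (hcs : (s, c) ∈ ([("A", 1), ("T", 2), ("G", 3), ("C", 4)] : List (String × Int))) :
    (bases.map gabCode).count c = bases.count s := by
  induction bases with
  | nil => rfl
  | cons b bs ih =>
    have hb := h b (by simp)
    have ih' := ih (fun x hx => h x (by simp [hx]))
    fin_cases hb <;> fin_cases hcs <;>
      simp_all [gabCode, baseCode?]

-- the cursor's skip phase on a sorted list keeps exactly the elements ≥ code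
lemma gabSkip_eq (c : Int) (l : List Int) (hs : l.Pairwise (· ≤ ·)) :
    gabSkip c l = l.filter (fun x => decide (c ≤ x)) := by
  induction l with
  | nil => rfl
  | cons x xs ih =>
    rw [List.pairwise_cons] at hs
    by_cases hx : x < c
    · simp [gabSkip, hx, ih hs.2, show ¬ c ≤ x by omega]
    · have hfix : xs.filter (fun x => decide (c ≤ x)) = xs :=
        List.filter_eq_self.mpr (fun y hy => by
          have := hs.1 y hy; simp; omega)
      simp [gabSkip, hx, show c ≤ x by omega, hfix]

-- the consume phase on a sorted list of elements ≥ code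
lemma gabTake_eq (c : Int) (n : Int) (l : List Int) (hs : l.Pairwise (· ≤ ·))
    (hall : ∀ x ∈ l, c ≤ x) :
    gabTake c n l = (n - (l.count c : Int), l.filter (fun x => decide (c < x))) := by
  induction l generalizing n with
  | nil => simp [gabTake]
  | cons x xs ih =>
    rw [List.pairwise_cons] at hs
    by_cases hx : x = c
    · subst hx
      have := ih (n - 1) hs.2 (fun y hy => hall y (by simp [hy]))
      simp [gabTake, this]
      ring
    · have hcx : c < x := lt_of_le_of_ne (hall x (by simp)) (fun h => hx h.symm)
      have hcnt : xs.count c = 0 :=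
        List.count_eq_zero.mpr (fun hy => by
          have := hs.1 c hy; omega)
      have hfix : xs.filter (fun x => decide (c < x)) = xs :=
        List.filter_eq_self.mpr (fun y hy => by
          have := hs.1 y hy; simp; omega)
      simp [gabTake, hx, hcnt, hcx, hfix]

-- one sweep step: skip + consume = subtract the multiplicity, keep the strictly larger codes
lemma gabStep_eq (c : Int) (n : Int) (l : List Int) (hs : l.Pairwise (· ≤ ·)) :
    gabTake c n (gabSkip c l) = (n - (l.count c : Int), l.filter (fun x => decide (c < x))) := by
  rw [gabSkip_eq c l hs]
  rw [gabTake_eq c n _ (hs.filter _) (fun x hx => by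
    have := List.of_mem_filter hx; simpa using this)]
  have hcnt : List.count c (l.filter (fun x => decide (c ≤ x))) = List.count c l :=
    List.count_filter (by simp)
  rw [hcnt, List.filter_filter]
  congr 1
  exact List.filter_congr (fun x _ => by by_cases h : c < x <;> simp [h] <;> omega)

lemma gabLoopA_eq (aln : List (List String)) (column : Int)
    (h : gabValid aln column) :
    ∀ a0 a1 a2 a3 : Int,
      gabLoopA aln column [a0, a1, a2, a3]
        = some [a0 - ((aln.filterMap (fun r => PySem.List.pyGet? r column)).count "A" : Int),
                a1 - ((aln.filterMap (fun r => PySem.List.pyGet? r column)).count "T" : Int),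
                a2 - ((aln.filterMap (fun r => PySem.List.pyGet? r column)).count "G" : Int),
                a3 - ((aln.filterMap (fun r => PySem.List.pyGet? r column)).count "C" : Int)] := by
  induction aln with
  | nil => intro a0 a1 a2 a3; simp [gabLoopA]
  | cons r rs ih =>
    intro a0 a1 a2 a3
    obtain ⟨b, hb, hmem⟩ := h r (by simp)
    have ih' := ih (fun x hx => h x (by simp [hx]))
    simp only [gabLoopA, hb, List.filterMap_cons]
    fin_cases hmem <;>
      simp [baseToInt?, ih', List.set, List.getD] <;> ring_nf

theorem get_allowable_bases_spec : Claim_equal_get_allowable_bases := by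
  intro aln column _ hpre
  unfold Spec_get_allowable_bases
  unfold Pre_get_allowable_bases at hpre
  rw [Bool.and_eq_true] at hpre
  have hvalid : gabValid aln column := by
    intro r hr
    have := (List.all_eq_true.mp hpre.1) r hr
    revert this
    cases hget : PySem.List.pyGet? r column with
    | none => simp
    | some b =>
      intro hmem
      exact ⟨b, rfl, by simpa using hmem⟩
  have hbase : ∀ b ∈ aln.filterMap (fun r => PySem.List.pyGet? r column),
      b ∈ (["-", "A", "T", "G", "C"] : List String) := by
    intro b hb
    rw [List.mem_filterMap] at hb
    obtain ⟨r, hr, hget⟩ := hb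
    obtain ⟨b', hb', hmem⟩ := hvalid r hr
    rw [hget] at hb'; cases hb'; exact hmem
  set n4 : Int := ((aln.length : Int) + 3) / 4 with hn4
  set bases := aln.filterMap (fun r => PySem.List.pyGet? r column) with hbases
  -- bounds from Pre_, one per base
  have hA := (List.all_eq_true.mp hpre.2) "A" (by simp)
  have hT := (List.all_eq_true.mp hpre.2) "T" (by simp)
  have hG := (List.all_eq_true.mp hpre.2) "G" (by simp)
  have hC := (List.all_eq_true.mp hpre.2) "C" (by simp)
  rw [decide_eq_true_iff] at hA hT hG hC
  -- ===== A side =====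
  have hloopA := gabLoopA_eq aln column hvalid n4 n4 n4 n4
  rw [← hbases] at hloopA
  -- ===== B side =====
  have hmapM := gab_mapM_eq aln column hvalid
  set S := PySem.List.sorted (bases.map gabCode) (fun x => x) false with hS
  have hperm : S.Perm (bases.map gabCode) := PySem.List.sorted_perm _ _ _
  have hpair : S.Pairwise (· ≤ ·) := by
    have := PySem.List.sorted_pairwise (xs := bases.map gabCode) (key := fun x => x)
    simpa using this
  have hcount : ∀ (s : String) (c : Int),
      (s, c) ∈ ([("A", 1), ("T", 2), ("G", 3), ("C", 4)] : List (String × Int)) →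
      (S.count c : Int) = (bases.count s : Int) := by
    intro s c hcs
    rw [hperm.count_eq, gab_count_code bases hbase s c hcs]
  -- merged filter chains
  have m2 : (S.filter (fun x => decide (1 < x))).filter (fun x => decide (2 < x))
      = S.filter (fun x => decide (2 < x)) := by
    rw [List.filter_filter]
    exact List.filter_congr (fun x _ => by by_cases h : (2:Int) < x <;> simp [h] <;> omega)
  have m3 : (S.filter (fun x => decide (2 < x))).filter (fun x => decide (3 < x))
      = S.filter (fun x => decide (3 < x)) := by
    rw [List.filter_filter]
    exact List.filter_congr (fun x _ => by by_cases h : (3:Int) < x <;> simp [h] <;> omega)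
  -- the sweep, step by step
  have h1 := gabStep_eq 1 n4 S hpair
  have h2 := gabStep_eq 2 n4 (S.filter (fun x => decide (1 < x))) (hpair.filter _)
  rw [m2] at h2
  have h3 := gabStep_eq 3 n4 (S.filter (fun x => decide (2 < x))) (hpair.filter _)
  rw [m3] at h3
  have h4 := gabStep_eq 4 n4 (S.filter (fun x => decide (3 < x))) (hpair.filter _)
  -- counts survive the filters
  have hc2 : ((S.filter (fun x => decide (1 < x))).count 2 : Int) = (S.count 2 : Int) := by
    exact_mod_cast List.count_filter (p := fun x => decide ((1:Int) < x)) (a := (2:Int)) (l := S) (by simp)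
  have hc3 : ((S.filter (fun x => decide (2 < x))).count 3 : Int) = (S.count 3 : Int) := by
    exact_mod_cast List.count_filter (p := fun x => decide ((2:Int) < x)) (a := (3:Int)) (l := S) (by simp)
  have hc4 : ((S.filter (fun x => decide (3 < x))).count 4 : Int) = (S.count 4 : Int) := by
    exact_mod_cast List.count_filter (p := fun x => decide ((3:Int) < x)) (a := (4:Int)) (l := S) (by simp)
  have cA := hcount "A" 1 (by simp)
  have cT := hcount "T" 2 (by simp)
  have cG := hcount "G" 3 (by simp)
  have cC := hcount "C" 4 (by simp)
  -- assemble
  unfold get_allowable_bases get_allowable_bases_alt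
  rw [hmapM]
  simp only [← hbases, ← hS, ← hn4]
  rw [show (List.replicate 4 n4) = [n4, n4, n4, n4] from rfl, hloopA]
  simp [gabScan, h1, h2, h3, h4, cA, cT, cG, cC, hA, hT, hG, hC]
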